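-- pv_equiv track=rewrite | github.com/suhteevah/job-hunter-mcp | scripts/swarm/swarm_ashby_playwright.py | pick_select_value
-- ===== SOURCE A (Python) =====
-- def pick_select_value(label: str, options: list) -> str:
--     ll = label.lower()
--     if "authorized" in ll or "authorization" in ll or "lawfully" in ll or "eligible" in ll:
--         for opt in options:
--             ol = opt.lower()
--             if "yes" in ol or "authorized" in ol or "do not require" in ol:
--                 return opt
--     if "sponsor" in ll or "visa" in ll or "immigration" in ll:
--         for opt in options:
--             ol = opt.lower()
--             if ol == "no" or "will not" in ol or "do not" in ol or "not require" in ol: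
--                 return opt
--     if any(kw in ll for kw in ["agree", "privacy", "consent", "acknowledge"]):
--         for opt in options:
--             if any(x in opt.lower() for x in ["agree", "yes", "i agree"]):
--                 return opt
--     if any(kw in ll for kw in ["gender", "race", "veteran", "disability", "ethnicity"]):
--         for opt in options:
--             if "decline" in opt.lower() or "prefer not" in opt.lower():
--                 return opt
--         return options[-1] if options else ""
--     if any(kw in ll for kw in ["remote", "hybrid", "relocation"]):
--         for opt in options:
--             if "yes" in opt.lower():
--                 return opt
--     if any(kw in ll for kw in ["how did you hear", "where did you", "source"]):
--         for opt in options: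
--             if any(x in opt.lower() for x in ["job board", "website", "online", "other"]):
--                 return opt
--     return options[0] if options else ""
-- ===== SOURCE B (Python) =====
-- # Index-first re-implementation: ONE pass over the options builds, for every rule,
-- # the position of the first option satisfying that rule's option predicate; the
-- # label is then resolved by pure lookups in that index (no per-rule option scans).
--
-- OPTION_PREDS = [
--     lambda ol: "yes" in ol or "authorized" in ol or "do not require" in ol,
--     lambda ol: ol == "no" or "will not" in ol or "do not" in ol or "not require" in ol,
--     lambda ol: "agree" in ol or "yes" in ol or "i agree" in ol,
--     lambda ol: "decline" in ol or "prefer not" in ol,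
--     lambda ol: "yes" in ol,
--     lambda ol: "job board" in ol or "website" in ol or "online" in ol or "other" in ol,
-- ]
--
-- LABEL_KWS = [
--     ("authorized", "authorization", "lawfully", "eligible"),
--     ("sponsor", "visa", "immigration"),
--     ("agree", "privacy", "consent", "acknowledge"),
--     ("gender", "race", "veteran", "disability", "ethnicity"),
--     ("remote", "hybrid", "relocation"),
--     ("how did you hear", "where did you", "source"),
-- ]
--
--
-- def pick_select_value(label: str, options: list) -> str:
--     # stage 1: first-match index per rule, one pass over options
--     first = {}
--     for j, opt in enumerate(options):
--         ol = opt.lower()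
--         for i, pred in enumerate(OPTION_PREDS):
--             if i not in first and pred(ol):
--                 first[i] = j
--     # stage 2: resolve the label against the index
--     ll = label.lower()
--     for i, kws in enumerate(LABEL_KWS):
--         if any(kw in ll for kw in kws):
--             if i in first:
--                 return options[first[i]]
--             if i == 3:  # demographic questions never fall through
--                 return options[-1] if options else ""
--     return options[0] if options else ""
-- ===== Notes on version B (the rewrite author's own statement) =====
-- stated objective: alternative
-- what changed: Instead of A's rule cascade that rescans the options list inside each matching label branch, B makes one pass over the options building a dict from rule number to the first matching option's index, then resolves the label by pure dict lookups (with the same demographic force-last and empty fallbacks).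
import Mathlib
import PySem

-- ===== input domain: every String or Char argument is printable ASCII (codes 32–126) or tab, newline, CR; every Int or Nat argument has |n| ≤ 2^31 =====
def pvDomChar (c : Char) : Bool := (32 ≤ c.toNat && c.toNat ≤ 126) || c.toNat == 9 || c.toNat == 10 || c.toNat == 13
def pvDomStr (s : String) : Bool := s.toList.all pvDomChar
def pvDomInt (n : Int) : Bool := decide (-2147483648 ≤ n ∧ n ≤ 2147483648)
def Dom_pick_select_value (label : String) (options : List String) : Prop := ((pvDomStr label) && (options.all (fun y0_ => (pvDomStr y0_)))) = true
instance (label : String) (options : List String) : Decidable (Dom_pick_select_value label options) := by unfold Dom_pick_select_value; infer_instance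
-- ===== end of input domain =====

-- B builds a first-match index over the options in ONE pass (a dict: rule ↦ first
-- matching option position) and resolves the label by lookups, instead of A's
-- per-rule rescans of the options (objective: alternative); return value only.

-- ===== PORT A =====
def pick_select_value (label : String) (options : List String) : String :=
  let ll := PySem.Str.lower label
  -- first if-block: work authorization
  match (if PySem.Str.isIn "authorized" ll || PySem.Str.isIn "authorization" ll ||
            PySem.Str.isIn "lawfully" ll || PySem.Str.isIn "eligible" ll then
           options.find? (fun opt =>
             let ol := PySem.Str.lower opt
             PySem.Str.isIn "yes" ol || PySem.Str.isIn "authorized" ol ||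
             PySem.Str.isIn "do not require" ol)
         else none) with
  | some opt => opt
  | none =>
  -- second if-block: sponsorship
  match (if PySem.Str.isIn "sponsor" ll || PySem.Str.isIn "visa" ll ||
            PySem.Str.isIn "immigration" ll then
           options.find? (fun opt =>
             let ol := PySem.Str.lower opt
             ol == "no" || PySem.Str.isIn "will not" ol || PySem.Str.isIn "do not" ol ||
             PySem.Str.isIn "not require" ol)
         else none) with
  | some opt => opt
  | none =>
  -- third if-block: agreement / consent
  match (if ["agree", "privacy", "consent", "acknowledge"].any (fun kw => PySem.Str.isIn kw ll) then
           options.find? (fun opt =>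
             ["agree", "yes", "i agree"].any (fun x => PySem.Str.isIn x (PySem.Str.lower opt)))
         else none) with
  | some opt => opt
  | none =>
  -- fourth if-block: demographics — returns on label match even when no option matches
  if ["gender", "race", "veteran", "disability", "ethnicity"].any (fun kw => PySem.Str.isIn kw ll) then
    match options.find? (fun opt =>
            PySem.Str.isIn "decline" (PySem.Str.lower opt) ||
            PySem.Str.isIn "prefer not" (PySem.Str.lower opt)) with
    | some opt => opt
    | none => if options ≠ [] then PySem.List.pyGetD options (-1) "" else ""
  else
  -- fifth if-block: remote/hybrid/relocation
  match (if ["remote", "hybrid", "relocation"].any (fun kw => PySem.Str.isIn kw ll) then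
           options.find? (fun opt => PySem.Str.isIn "yes" (PySem.Str.lower opt))
         else none) with
  | some opt => opt
  | none =>
  -- sixth if-block: source
  match (if ["how did you hear", "where did you", "source"].any (fun kw => PySem.Str.isIn kw ll) then
           options.find? (fun opt =>
             ["job board", "website", "online", "other"].any
               (fun x => PySem.Str.isIn x (PySem.Str.lower opt)))
         else none) with
  | some opt => opt
  | none => if options ≠ [] then PySem.List.pyGetD options 0 "" else ""

-- ===== PORT B =====
-- OPTION_PREDS of Source B: each rule's predicate on the lowered option
def pvOptionPreds : List (String → Bool) :=
  [ fun ol => PySem.Str.isIn "yes" ol || PySem.Str.isIn "authorized" ol ||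
              PySem.Str.isIn "do not require" ol,
    fun ol => ol == "no" || PySem.Str.isIn "will not" ol || PySem.Str.isIn "do not" ol ||
              PySem.Str.isIn "not require" ol,
    fun ol => PySem.Str.isIn "agree" ol || PySem.Str.isIn "yes" ol ||
              PySem.Str.isIn "i agree" ol,
    fun ol => PySem.Str.isIn "decline" ol || PySem.Str.isIn "prefer not" ol,
    fun ol => PySem.Str.isIn "yes" ol,
    fun ol => PySem.Str.isIn "job board" ol || PySem.Str.isIn "website" ol ||
              PySem.Str.isIn "online" ol || PySem.Str.isIn "other" ol ]

-- LABEL_KWS of Source B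
def pvLabelKws : List (List String) :=
  [ ["authorized", "authorization", "lawfully", "eligible"],
    ["sponsor", "visa", "immigration"],
    ["agree", "privacy", "consent", "acknowledge"],
    ["gender", "race", "veteran", "disability", "ethnicity"],
    ["remote", "hybrid", "relocation"],
    ["how did you hear", "where did you", "source"] ]

-- stage 1 of Source B: one pass over enumerate(options); for each (i, pred) in
-- enumerate(OPTION_PREDS): if i not in first and pred(ol): first[i] = j
def pvFirstIndex (options : List String) : PySem.Dict Int Int :=
  (PySem.List.enumerate options).foldl (fun first jo =>
    let ol := PySem.Str.lower jo.2
    (PySem.List.enumerate pvOptionPreds).foldl (fun first ip =>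
      if !(first.contains ip.1) && ip.2 ol then first.insert ip.1 jo.1 else first) first)
    PySem.Dict.empty

-- stage 2 of Source B: the resolution loop over enumerate(LABEL_KWS)
def pvResolve (rules : List (Int × List String)) (ll : String) (options : List String)
    (first : PySem.Dict Int Int) : String :=
  match rules with
  | [] => if options ≠ [] then PySem.List.pyGetD options 0 "" else ""
  | (i, kws) :: rest =>
    if kws.any (fun kw => PySem.Str.isIn kw ll) then
      match first.get? i with
      | some j => PySem.List.pyGetD options j ""  -- options[first[i]]: index always in range
      | none =>
        if i == 3 then (if options ≠ [] then PySem.List.pyGetD options (-1) "" else "")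
        else pvResolve rest ll options first
    else pvResolve rest ll options first

def pick_select_value_alt (label : String) (options : List String) : String :=
  pvResolve (PySem.List.enumerate pvLabelKws) (PySem.Str.lower label) options
    (pvFirstIndex options)

-- ===== PRECONDITION & SPEC =====
def Spec_pick_select_value (label : String) (options : List String) (out : String) : Prop := out = pick_select_value_alt label options
instance (label : String) (options : List String) (out : String) : Decidable (Spec_pick_select_value label options out) := by unfold Spec_pick_select_value; infer_instance

-- ===== CLAIM (what is proved, stated in full; the proofs are below) =====
def Claim_equal_pick_select_value : Prop := ∀ (label : String) (options : List String), Dom_pick_select_value label options → Spec_pick_select_value label options (pick_select_value label options)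

-- ===== LEMMAS AND PROOFS =====

-- the predicate of rule i (to state facts about pvFirstIndex's keys)
def pvPredAt (i : Int) : String → Bool :=
  fun ol =>
    if i = 0 then PySem.Str.isIn "yes" ol || PySem.Str.isIn "authorized" ol ||
                  PySem.Str.isIn "do not require" ol
    else if i = 1 then ol == "no" || PySem.Str.isIn "will not" ol ||
                  PySem.Str.isIn "do not" ol || PySem.Str.isIn "not require" ol
    else if i = 2 then PySem.Str.isIn "agree" ol || PySem.Str.isIn "yes" ol ||
                  PySem.Str.isIn "i agree" ol
    else if i = 3 then PySem.Str.isIn "decline" ol || PySem.Str.isIn "prefer not" ol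
    else if i = 4 then PySem.Str.isIn "yes" ol
    else PySem.Str.isIn "job board" ol || PySem.Str.isIn "website" ol ||
         PySem.Str.isIn "online" ol || PySem.Str.isIn "other" ol

theorem pv_get?_ite_insert_of_ne (c : Prop) [Decidable c] (d : PySem.Dict Int Int)
    (k v i : Int) (h : i ≠ k) :
    (if c then d.insert k v else d).get? i = d.get? i := by
  split_ifs with hc
  · exact PySem.Dict.get?_insert_of_ne d v h
  · rfl

theorem pv_get?_ite_insert_self (c : Prop) [Decidable c] (d : PySem.Dict Int Int)
    (k v : Int) :
    (if c then d.insert k v else d).get? k = if c then some v else d.get? k := by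
  split_ifs with hc
  · simp [PySem.Dict.get?_insert_self]
  · rfl

theorem pv_contains_ite_insert_of_ne (c : Prop) [Decidable c] (d : PySem.Dict Int Int)
    (k v i : Int) (h : i ≠ k) :
    (if c then d.insert k v else d).contains i = d.contains i := by
  split_ifs with hc
  · simp [PySem.Dict.contains_insert, h]
  · rfl

theorem pv_step_get (d : PySem.Dict Int Int) (ol : String) (j i : Int)
    (hi : 0 ≤ i ∧ i < 6) :
    ((PySem.List.enumerate pvOptionPreds).foldl (fun first ip =>
        if !(first.contains ip.1) && ip.2 ol then first.insert ip.1 j else first) d).get? i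
      = match d.get? i with
        | some v => some v
        | none => if pvPredAt i ol then some j else none := by
  obtain ⟨h0, h6⟩ := hi
  simp only [pvOptionPreds, PySem.List.enumerate_cons, PySem.List.enumerate_nil, List.foldl]
  interval_cases i <;>
  · simp [pv_get?_ite_insert_of_ne, pv_get?_ite_insert_self,
      pv_contains_ite_insert_of_ne]
    rw [PySem.Dict.contains_eq_isSome_get?]
    cases hd : d.get? _ <;> simp [pvPredAt]

theorem pv_firstIndex_get (options : List String) (s : Int) (d : PySem.Dict Int Int)
    (i : Int) (hi : 0 ≤ i ∧ i < 6) :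
    ((PySem.List.enumerate options s).foldl (fun first jo =>
        let ol := PySem.Str.lower jo.2
        (PySem.List.enumerate pvOptionPreds).foldl (fun first ip =>
          if !(first.contains ip.1) && ip.2 ol then first.insert ip.1 jo.1 else first) first)
        d).get? i
      = match d.get? i with
        | some v => some v
        | none => (options.findIdx? (fun o => pvPredAt i (PySem.Str.lower o))).map
                    (fun n => s + (n : Int)) := by
  induction options generalizing s d with
  | nil =>
    simp only [PySem.List.enumerate_nil, List.foldl_nil, List.findIdx?_nil]
    cases d.get? i <;> rfl
  | cons o os ih =>
    rw [PySem.List.enumerate_cons]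
    simp only [List.foldl_cons]
    rw [ih (s + 1)]
    rw [pv_step_get _ _ _ _ hi]
    cases hd : d.get? i with
    | some v => rfl
    | none =>
      by_cases hp : pvPredAt i (PySem.Str.lower o)
      · simp [List.findIdx?_cons, hp]
      · simp only [hp, if_false, List.findIdx?_cons, Bool.false_eq_true]
        cases hfi : List.findIdx? (fun o => pvPredAt i (PySem.Str.lower o)) os
        · simp
        · simp
          omega

theorem pv_lookup (xs : List String) (q : String → Bool) (k : String) :
    (match (xs.findIdx? q).map (fun n => (0 : Int) + (n : Int)) with
      | some j => PySem.List.pyGetD xs j ""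
      | none => k)
      = match xs.find? q with
        | some o => o
        | none => k := by
  induction xs with
  | nil => rfl
  | cons x xs ih =>
    by_cases h : q x
    · simp [List.findIdx?_cons, h]
    · simp only [List.findIdx?_cons, List.find?_cons, h, Bool.false_eq_true, if_false]
      cases hfi : List.findIdx? q xs with
      | none => simp [hfi] at ih ⊢; exact ih
      | some n =>
        simp only [hfi, Option.map_some] at ih ⊢
        simp only [Option.pure_def, Option.bind_eq_bind, Option.bind_some, Option.map_some, zero_add,
          PySem.List.pyGetD_natCast, List.getD_cons_succ] at ih ⊢
        exact ih

-- pushes the if-guard out of A's "match (if guard then find? else none)" blocks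
theorem pv_push_if (c : Prop) [Decidable c] (x : Option String) (k : String) :
    (match (if c then x else none) with | some opt => opt | none => k)
      = if c then (match x with | some opt => opt | none => k) else k := by
  split_ifs <;> rfl

-- ===== VERDICT (by name: the statement is the Claim_ definition above) =====
theorem pick_select_value_spec : Claim_equal_pick_select_value := by
  intro label options _
  unfold Spec_pick_select_value
  have hfi : ∀ i : Int, 0 ≤ i → i < 6 → (pvFirstIndex options).get? i =
      (options.findIdx? (fun o => pvPredAt i (PySem.Str.lower o))).map
        (fun n => (0 : Int) + (n : Int)) := by
    intro i h1 h2
    have h := pv_firstIndex_get options 0 PySem.Dict.empty i ⟨h1, h2⟩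
    simpa [pvFirstIndex, PySem.Dict.get?_empty] using h
  simp only [pick_select_value_alt, pvLabelKws, PySem.List.enumerate_cons,
    PySem.List.enumerate_nil, pvResolve]
  norm_num
  rw [hfi 0 (by norm_num) (by norm_num), hfi 1 (by norm_num) (by norm_num),
    hfi 2 (by norm_num) (by norm_num), hfi 3 (by norm_num) (by norm_num),
    hfi 4 (by norm_num) (by norm_num), hfi 5 (by norm_num) (by norm_num)]
  simp only [pv_lookup, pvPredAt]
  simp only [pick_select_value, pv_push_if, List.any_cons, List.any_nil,
    Bool.or_false, Bool.or_assoc]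
  norm_num
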